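-- pv_equiv track=rewrite | github.com/maercaestro/megat-sukatoken | src/sukatoken.py | _tokenize_suku_kata
-- ===== SOURCE A (Python) =====
-- def _tokenize_suku_kata(text):
--     """
--     Tokenizes a single word into Malay suku kata (syllables) using refined rules.
--
--     1. A suku kata is a consonant followed by a vowel (CV).
--     2. Syllable boundary is determined by a vowel or new CV pattern (CVC).
--     3. If no CV pattern is found, treat the character individually.
--     """
--     tokens = []
--     i = 0
--     while i < len(text):
--         if (i + 1 < len(text)
--             and text[i] in "bcdfghjklmnpqrstvwxyz"
--             and text[i + 1] in "aeiou"):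
--             start = i
--             i += 2
--             while i < len(text):
--                 if text[i] in "aeiou":
--                     break
--                 elif (i + 1 < len(text)
--                       and text[i] in "bcdfghjklmnpqrstvwxyz"
--                       and text[i + 1] in "aeiou"):
--                     break
--                 else:
--                     i += 1
--             tokens.append(text[start:i])
--         else:
--             tokens.append(text[i])
--             i += 1
--     return tokens
-- ===== SOURCE B (Python) =====
-- import re
--
-- _SUKU_RE = re.compile(
--     r"[bcdfghjklmnpqrstvwxyz][aeiou]"
--     r"(?:(?![aeiou])(?![bcdfghjklmnpqrstvwxyz][aeiou])[\s\S])*"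
--     r"|[\s\S]"
-- )
--
-- def _tokenize_suku_kata(text):
--     return _SUKU_RE.findall(text)
-- ===== Notes on version B (the rewrite author's own statement) =====
-- stated objective: idiomatic
-- what changed: Replaced the hand-rolled double while loop with index arithmetic and slicing by a single compiled regex (syllable alternative 'CV followed by greedy non-boundary chars', else any single char) and one findall call.
import Mathlib
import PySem

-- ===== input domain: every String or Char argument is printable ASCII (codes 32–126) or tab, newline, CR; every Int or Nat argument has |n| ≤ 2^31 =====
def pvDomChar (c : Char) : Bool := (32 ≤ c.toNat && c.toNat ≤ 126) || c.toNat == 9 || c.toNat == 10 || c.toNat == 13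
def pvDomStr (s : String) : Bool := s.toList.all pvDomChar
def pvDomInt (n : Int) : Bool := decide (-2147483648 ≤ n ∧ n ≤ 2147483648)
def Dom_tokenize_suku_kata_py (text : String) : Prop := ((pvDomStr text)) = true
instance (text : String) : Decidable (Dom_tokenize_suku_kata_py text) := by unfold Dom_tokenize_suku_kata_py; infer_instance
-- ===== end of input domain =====

-- B replaces A's index-juggling double while loop by a single compiled regex findall
-- (objective: idiomatic; same linear cost).

-- ===== PORT A =====
-- 'text[i] in "bcdfghjklmnpqrstvwxyz"' / 'text[i] in "aeiou"' (single ASCII char in a literal)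
def pvIsCons (c : Char) : Bool := "bcdfghjklmnpqrstvwxyz".toList.contains c
def pvIsVowel (c : Char) : Bool := "aeiou".toList.contains c

-- inner 'while i < len(text): if vowel: break elif CV ahead: break else: i += 1'
def pvInnerA (cs : List Char) (i : Nat) : Nat :=
  if h : i < cs.length then
    if pvIsVowel cs[i] then i
    else if i + 1 < cs.length ∧ pvIsCons cs[i] = true ∧ pvIsVowel (cs.getD (i+1) 'a') = true then i
    else pvInnerA cs (i + 1)
  else i
termination_by cs.length - i

-- the inner loop never moves i backwards (cited by pvLoopA's decreasing_by)
theorem pvInnerA_ge (cs : List Char) (k : Nat) : k ≤ pvInnerA cs k := by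
  fun_induction pvInnerA cs k with
  | case1 => omega
  | case2 => omega
  | case3 k h h1 h2 ih => omega
  | case4 => omega

-- outer 'while i < len(text)'; 'tokens.append(...)' builds the result list in order
-- (text[start:i] with 0 ≤ start ≤ i ≤ len(text) is exactly (cs.drop start).take (i - start))
def pvLoopA (cs : List Char) (i : Nat) : List String :=
  if h : i < cs.length then
    if i + 1 < cs.length ∧ pvIsCons cs[i] = true ∧ pvIsVowel (cs.getD (i+1) 'a') = true then
      String.ofList ((cs.drop i).take (pvInnerA cs (i + 2) - i)) :: pvLoopA cs (pvInnerA cs (i + 2))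
    else
      String.ofList [cs[i]] :: pvLoopA cs (i + 1)
  else []
termination_by cs.length - i
decreasing_by
  · have := pvInnerA_ge cs (i + 2); omega
  · omega

def tokenize_suku_kata_py (text : String) : List String := pvLoopA text.toList 0

-- ===== PORT B =====
def pvHeadVowel (cs : List Char) : Bool :=
  match cs with
  | r :: _ => pvIsVowel r
  | [] => false

-- the greedy star '(?:(?![aeiou])(?![bcdfghjklmnpqrstvwxyz][aeiou])[\s\S])*':
-- returns (matched chars, remainder)
def pvStarB (cs : List Char) : List Char × List Char :=
  match cs with
  | [] => ([], [])
  | c :: rest =>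
    if pvIsVowel c then ([], c :: rest)
    else if pvIsCons c && pvHeadVowel rest then ([], c :: rest)
    else (c :: (pvStarB rest).1, (pvStarB rest).2)

-- (pvStarB cs).2 is a suffix (cited by pvScanB's decreasing_by)
theorem pvStarB_len (cs : List Char) : (pvStarB cs).2.length ≤ cs.length := by
  fun_induction pvStarB cs with
  | case1 => simp
  | case2 => simp
  | case3 => simp
  | case4 c rest h1 h2 ih => simp only [List.length_cons]; omega


-- findall: at each position the syllable alternative '[cons][vowel](star)' is tried first,
-- else the single-character alternative '[\s\S]'
def pvScanB (cs : List Char) : List String :=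
  match cs with
  | [] => []
  | [c] => [String.ofList [c]]
  | c1 :: c2 :: rest =>
    if pvIsCons c1 && pvIsVowel c2 then
      String.ofList (c1 :: c2 :: (pvStarB rest).1) :: pvScanB (pvStarB rest).2
    else
      String.ofList [c1] :: pvScanB (c2 :: rest)
termination_by cs.length
decreasing_by
  · have := pvStarB_len rest; simp only [List.length_cons]; omega
  · simp only [List.length_cons]; omega

def tokenize_suku_kata_py_alt (text : String) : List String := pvScanB text.toList

-- ===== PRECONDITION & SPEC =====
def Spec_tokenize_suku_kata_py (text : String) (out : List String) : Prop := out = tokenize_suku_kata_py_alt text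
instance (text : String) (out : List String) : Decidable (Spec_tokenize_suku_kata_py text out) := by unfold Spec_tokenize_suku_kata_py; infer_instance

-- ===== CLAIM (what is proved, stated in full; the proofs are below) =====
def Claim_equal_tokenize_suku_kata_py : Prop := ∀ (text : String), Dom_tokenize_suku_kata_py text → Spec_tokenize_suku_kata_py text (tokenize_suku_kata_py text)

-- ===== LEMMAS AND PROOFS =====

-- one-step unfolding equations for the two recursive scanners
theorem pvStarB_nil : pvStarB [] = ([], []) := rfl
theorem pvStarB_cons (c : Char) (rest : List Char) :
    pvStarB (c :: rest) =
      (if pvIsVowel c then ([], c :: rest)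
       else if pvIsCons c && pvHeadVowel rest then ([], c :: rest)
       else (c :: (pvStarB rest).1, (pvStarB rest).2)) := rfl
theorem pvScanB_nil : pvScanB [] = [] := by simp only [pvScanB]
theorem pvScanB_one (c : Char) : pvScanB [c] = [String.ofList [c]] := by simp only [pvScanB]
theorem pvScanB_cons2 (c1 c2 : Char) (rest : List Char) :
    pvScanB (c1 :: c2 :: rest) =
      (if pvIsCons c1 && pvIsVowel c2 then
        String.ofList (c1 :: c2 :: (pvStarB rest).1) :: pvScanB (pvStarB rest).2
      else String.ofList [c1] :: pvScanB (c2 :: rest)) := by simp only [pvScanB]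

theorem pvStarB_append (cs : List Char) : (pvStarB cs).1 ++ (pvStarB cs).2 = cs := by
  fun_induction pvStarB cs with
  | case1 => simp
  | case2 => simp
  | case3 => simp
  | case4 c rest h1 h2 ih => simpa using ih

theorem pvStarB_take (cs : List Char) : cs.take (pvStarB cs).1.length = (pvStarB cs).1 :=
  calc cs.take (pvStarB cs).1.length
      = ((pvStarB cs).1 ++ (pvStarB cs).2).take (pvStarB cs).1.length := by
        rw [pvStarB_append]
    _ = (pvStarB cs).1 := List.take_left

theorem pvStarB_drop (cs : List Char) : cs.drop (pvStarB cs).1.length = (pvStarB cs).2 :=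
  calc cs.drop (pvStarB cs).1.length
      = ((pvStarB cs).1 ++ (pvStarB cs).2).drop (pvStarB cs).1.length := by
        rw [pvStarB_append]
    _ = (pvStarB cs).2 := List.drop_left

-- the inner consonant-consuming loop of A is exactly the greedy star of B, run on the suffix
theorem pvInnerA_star (cs : List Char) (i : Nat) :
    pvInnerA cs i = i + (pvStarB (cs.drop i)).1.length := by
  fun_induction pvInnerA cs i with
  | case1 i h hv =>
    rw [List.drop_eq_getElem_cons h]
    simp [pvStarB, hv]
  | case2 i h hv hc =>
    rw [List.drop_eq_getElem_cons h]
    have h1 : i + 1 < cs.length := hc.1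
    have hr : cs.drop (i+1) = cs[i+1] :: cs.drop (i+2) := List.drop_eq_getElem_cons h1
    have hv1 : pvIsVowel (cs.getD (i+1) 'a') = true := hc.2.2
    rw [List.getD_eq_getElem cs 'a' h1] at hv1
    rw [pvStarB_cons, hr]
    simp [pvHeadVowel, hv, hv1, hc.2.1]
  | case3 i h hv hc ih =>
    rw [List.drop_eq_getElem_cons h]
    have hguard : (pvIsCons cs[i] && pvHeadVowel (cs.drop (i+1))) = false := by
      by_cases h1 : i + 1 < cs.length
      · have hr : cs.drop (i+1) = cs[i+1] :: cs.drop (i+2) := List.drop_eq_getElem_cons h1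
        rw [hr]
        simp only [pvHeadVowel, Bool.and_eq_false_iff]
        by_cases hcons : pvIsCons cs[i] = true
        · right
          by_cases hv2 : pvIsVowel cs[i+1] = true
          · exact absurd ⟨h1, hcons, by rw [List.getD_eq_getElem cs 'a' h1]; exact hv2⟩ hc
          · simpa using hv2
        · left; simpa using hcons
      · have : cs.drop (i+1) = [] := List.drop_eq_nil_of_le (by omega)
        rw [this]; simp [pvHeadVowel]
    rw [pvStarB_cons]
    simp only [hv, Bool.false_eq_true, if_false, hguard, List.length_cons]
    omega
  | case4 i h =>
    have : cs.drop i = [] := List.drop_eq_nil_of_le (by omega)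
    simp [this, pvStarB_nil]

-- main invariant: A's outer loop from index i computes B's scan of the suffix
theorem pvLoopA_scanB (cs : List Char) (i : Nat) :
    pvLoopA cs i = pvScanB (cs.drop i) := by
  fun_induction pvLoopA cs i with
  | case1 i h hcv ih =>
    have h1 : i + 1 < cs.length := hcv.1
    have hd : cs.drop i = cs[i] :: cs[i+1] :: cs.drop (i+2) := by
      rw [List.drop_eq_getElem_cons h, List.drop_eq_getElem_cons h1]
    have hv1 : pvIsVowel cs[i+1] = true := by
      have := hcv.2.2; rwa [List.getD_eq_getElem cs 'a' h1] at this
    have hj : pvInnerA cs (i+2) = (i+2) + (pvStarB (cs.drop (i+2))).1.length :=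
      pvInnerA_star cs (i+2)
    have htok : (cs.drop i).take (pvInnerA cs (i+2) - i)
        = cs[i] :: cs[i+1] :: (pvStarB (cs.drop (i+2))).1 := by
      rw [hd, hj]
      have he : i + 2 + (pvStarB (cs.drop (i+2))).1.length - i
          = (pvStarB (cs.drop (i+2))).1.length + 2 := by omega
      rw [he]
      simp only [List.take_succ_cons]
      rw [pvStarB_take]
    have hrest : cs.drop (pvInnerA cs (i+2)) = (pvStarB (cs.drop (i+2))).2 := by
      rw [hj, ← List.drop_drop, pvStarB_drop]
    rw [htok, ih, hrest, hd, pvScanB_cons2]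
    simp [hcv.2.1, hv1]
  | case2 i h hcv ih =>
    rw [List.drop_eq_getElem_cons h, ih]
    by_cases h1 : i + 1 < cs.length
    · have hd1 : cs.drop (i+1) = cs[i+1] :: cs.drop (i+2) := List.drop_eq_getElem_cons h1
      have hguard : (pvIsCons cs[i] && pvIsVowel cs[i+1]) = false := by
        by_cases hcons : pvIsCons cs[i] = true
        · by_cases hv2 : pvIsVowel cs[i+1] = true
          · exact absurd ⟨h1, hcons, by rw [List.getD_eq_getElem cs 'a' h1]; exact hv2⟩ hcv
          · simp [hv2]
        · simp [Bool.eq_false_iff.mpr hcons]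
      rw [hd1, pvScanB_cons2]
      simp only [hguard, Bool.false_eq_true, if_false]
    · have h0 : cs.drop (i+1) = [] := List.drop_eq_nil_of_le (by omega)
      rw [h0]
      simp [pvScanB_one, pvScanB_nil]
  | case3 i h =>
    have : cs.drop i = [] := List.drop_eq_nil_of_le (by omega)
    simp [this, pvScanB_nil]

-- ===== VERDICT (by name: the statement is the Claim_ definition above) =====
theorem tokenize_suku_kata_py_spec : Claim_equal_tokenize_suku_kata_py := by
  intro text _
  unfold Spec_tokenize_suku_kata_py tokenize_suku_kata_py tokenize_suku_kata_py_alt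
  simpa using pvLoopA_scanB text.toList 0
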